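-- pv_equiv track=rewrite | github.com/Square789/AoC | y2020/d06.py | sol0
-- ===== SOURCE A (Python) =====
-- def sol0(pzin):
-- 	q = 0
-- 	for group in pzin:
-- 		answered = set()
-- 		for person in group.strip().split("\n"):
-- 			answered |= {*person}
-- 		q += len(answered)
-- 	return q
-- ===== SOURCE B (Python) =====
-- def sol0(pzin):
-- 	total = 0
-- 	for group in pzin:
-- 		uniq = []
-- 		for c in sorted(group.strip()):
-- 			if not uniq or c != uniq[-1]:
-- 				uniq.append(c)
-- 		total += sum(1 for c in uniq if c != "\n")
-- 	return total
-- ===== Notes on version B (the rewrite author's own statement) =====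
-- stated objective: alternative
-- what changed: Replaces A's per-person hash-set unions by a sort-then-scan distinct count: each stripped group is sorted as one character stream, adjacent duplicates are dropped in a single scan, and the non-newline survivors are counted.
import Mathlib
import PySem

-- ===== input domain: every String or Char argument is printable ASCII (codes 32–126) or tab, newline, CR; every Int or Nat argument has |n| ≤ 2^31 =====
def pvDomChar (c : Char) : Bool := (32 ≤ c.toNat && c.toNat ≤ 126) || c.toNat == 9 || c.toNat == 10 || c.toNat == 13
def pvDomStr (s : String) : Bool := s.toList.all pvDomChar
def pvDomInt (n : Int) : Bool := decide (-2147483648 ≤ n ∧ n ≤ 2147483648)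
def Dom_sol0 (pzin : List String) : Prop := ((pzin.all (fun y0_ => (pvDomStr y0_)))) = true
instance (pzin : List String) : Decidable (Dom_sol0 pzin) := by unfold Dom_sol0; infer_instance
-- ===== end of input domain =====

-- B counts distinct answers by sorting each stripped group, scanning once to drop adjacent
-- duplicates, and counting the non-newline survivors — no sets; objective: alternative.

-- ===== PORT A =====
-- for group in pzin: answered = set(); for person in group.strip().split("\n"): answered |= {*person}; q += len(answered)
def sol0 (pzin : List String) : Int :=
  pzin.foldl (fun q group =>
    let answered : PySem.Set Char :=
      (PySem.Chars.splitOn (PySem.Chars.strip group.toList) ['\n']).foldl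
        (fun s person => PySem.Set.update s person) PySem.Set.empty
    q + PySem.Set.len answered) 0

-- ===== PORT B =====
-- for group in pzin: uniq = []; for c in sorted(group.strip()): if not uniq or c != uniq[-1]: uniq.append(c);
--   total += sum(1 for c in uniq if c != "\n")
def sol0_alt (pzin : List String) : Int :=
  pzin.foldl (fun total group =>
    let uniq : List Char :=
      (PySem.List.sorted (PySem.Chars.strip group.toList) (fun c => c) false).foldl
        (fun u c => if u = [] ∨ u.getLast? ≠ some c then u ++ [c] else u) []
    total + ((uniq.filter (fun c => c != '\n')).map (fun _ => (1 : Int))).sum) 0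

-- ===== PRECONDITION & SPEC =====
def Spec_sol0 (pzin : List String) (out : Int) : Prop := out = sol0_alt pzin
instance (pzin : List String) (out : Int) : Decidable (Spec_sol0 pzin out) := by unfold Spec_sol0; infer_instance

-- ===== CLAIM (what is proved, stated in full; the proofs are below) =====
def Claim_equal_sol0 : Prop := ∀ (pzin : List String), Dom_sol0 pzin → Spec_sol0 pzin (sol0 pzin)

-- ===== LEMMAS AND PROOFS =====

theorem go_zero (cur : List Char) (acc : List (List Char)) :
    PySem.Chars.splitOn.go ['\n'] 0 [] cur acc = (cur.reverse :: acc).reverse := by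
  simp [PySem.Chars.splitOn.go]

theorem go_nil (fuel : Nat) (cur : List Char) (acc : List (List Char)) :
    PySem.Chars.splitOn.go ['\n'] (fuel + 1) [] cur acc = (cur.reverse :: acc).reverse := by
  simp [PySem.Chars.splitOn.go]

theorem go_match (fuel : Nat) (rest cur : List Char) (acc : List (List Char)) :
    PySem.Chars.splitOn.go ['\n'] (fuel + 1) ('\n' :: rest) cur acc
      = PySem.Chars.splitOn.go ['\n'] fuel rest [] (cur.reverse :: acc) := by
  rw [PySem.Chars.splitOn.go]
  simp [List.isPrefixOf]

theorem go_nomatch (fuel : Nat) (c : Char) (rest cur : List Char) (acc : List (List Char))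
    (hc : c ≠ '\n') :
    PySem.Chars.splitOn.go ['\n'] (fuel + 1) (c :: rest) cur acc
      = PySem.Chars.splitOn.go ['\n'] fuel rest (c :: cur) acc := by
  rw [PySem.Chars.splitOn.go]
  simp [List.isPrefixOf]
  exact fun h' => absurd h'.symm hc

-- the concatenation of the '\n'-split pieces is the string with its '\n's removed
theorem go_flatten (fuel : Nat) : ∀ (l cur : List Char) (acc : List (List Char)),
    l.length ≤ fuel →
    (PySem.Chars.splitOn.go ['\n'] fuel l cur acc).flatten
      = acc.reverse.flatten ++ cur.reverse ++ l.filter (fun c => c != '\n') := by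
  induction fuel with
  | zero =>
    intro l cur acc h
    have hl : l = [] := List.eq_nil_of_length_eq_zero (Nat.le_zero.mp h)
    subst hl
    rw [go_zero]
    simp
  | succ fuel ih =>
    intro l cur acc h
    cases l with
    | nil => rw [go_nil]; simp
    | cons c rest =>
      by_cases hc : c = '\n'
      · subst hc
        rw [go_match, ih _ _ _ (by simpa using Nat.le_of_succ_le_succ h)]
        simp
      · rw [go_nomatch _ _ _ _ _ hc, ih _ _ _ (by simpa using Nat.le_of_succ_le_succ h)]
        simp [hc]

theorem splitOn_flatten (cs : List Char) :
    (PySem.Chars.splitOn cs ['\n']).flatten = cs.filter (fun c => c != '\n') := by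
  have := go_flatten (cs.length + 1) cs [] [] (by omega)
  simpa [PySem.Chars.splitOn] using this

theorem mem_of_getLast?_eq (u : List Char) (l : Char) (h : u.getLast? = some l) : l ∈ u := by
  obtain ⟨pre, rfl⟩ := List.getLast?_eq_some_iff.mp h
  simp

-- invariant of B's adjacent-dedup scan over a (≤)-sorted list: the result is strictly
-- increasing and holds exactly the elements already kept plus the elements scanned
theorem adj_invariant : ∀ (ys u : List Char),
    ys.Pairwise (· ≤ ·) → u.Pairwise (· < ·) → (∀ x ∈ u, ∀ y ∈ ys, x ≤ y) →
    ((ys.foldl (fun u c => if u = [] ∨ u.getLast? ≠ some c then u ++ [c] else u) u).Pairwise (· < ·)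
      ∧ ∀ x, x ∈ ys.foldl (fun u c => if u = [] ∨ u.getLast? ≠ some c then u ++ [c] else u) u
              ↔ x ∈ u ∨ x ∈ ys) := by
  intro ys
  induction ys with
  | nil => intro u _ hu _; exact ⟨hu, by simp⟩
  | cons c rest ih =>
    intro u hys hu hle
    have hys' : rest.Pairwise (· ≤ ·) := hys.of_cons
    have hcle : ∀ y ∈ rest, c ≤ y := fun y hy => List.rel_of_pairwise_cons hys hy
    by_cases hbr : u = [] ∨ u.getLast? ≠ some c
    · -- c is appended
      have hcnotin : c ∉ u := by
        intro hcin
        rcases hbr with h0 | hlast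
        · simp [h0] at hcin
        · cases hgl : u.getLast? with
          | none => exact List.ne_nil_of_mem hcin (List.getLast?_eq_none_iff.mp hgl)
          | some l =>
            have hlc : l ≤ c := hle l (mem_of_getLast?_eq u l hgl) c (List.mem_cons_self ..)
            have hcl : c ≤ l := by
              obtain ⟨pre, rfl⟩ := List.getLast?_eq_some_iff.mp hgl
              rcases List.mem_append.mp hcin with h | h
              · exact le_of_lt ((List.pairwise_append.mp hu).2.2 c h l (by simp))
              · rw [List.mem_singleton] at h; exact le_of_eq h
            have : l = c := le_antisymm hlc hcl
            exact hlast (by rw [hgl, this])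
      have hu' : (u ++ [c]).Pairwise (· < ·) := by
        rw [List.pairwise_append]
        refine ⟨hu, List.pairwise_singleton _ _, ?_⟩
        intro x hx y hy
        rw [List.mem_singleton] at hy
        subst hy
        exact lt_of_le_of_ne (hle x hx y (List.mem_cons_self ..)) (fun h => hcnotin (h ▸ hx))
      have hle' : ∀ x ∈ u ++ [c], ∀ y ∈ rest, x ≤ y := by
        intro x hx y hy
        rcases List.mem_append.mp hx with h | h
        · exact hle x h y (List.mem_cons_of_mem _ hy)
        · rw [List.mem_singleton] at h; exact le_of_eq_of_le h (hcle y hy)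
      have hres := ih (u ++ [c]) hys' hu' hle'
      simp only [List.foldl_cons, if_pos hbr]
      refine ⟨hres.1, fun x => ?_⟩
      rw [hres.2, List.mem_append, List.mem_singleton, List.mem_cons]
      tauto
    · -- c is skipped: it equals the last kept element
      have hbr2 : u.getLast? = some c := by
        by_cases h0 : u = []
        · exact absurd (Or.inl h0) hbr
        · by_cases h1 : u.getLast? = some c
          · exact h1
          · exact absurd (Or.inr h1) hbr
      have hcin : c ∈ u := mem_of_getLast?_eq u c hbr2
      have hle' : ∀ x ∈ u, ∀ y ∈ rest, x ≤ y := fun x hx y hy => hle x hx y (List.mem_cons_of_mem _ hy)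
      have hres := ih u hys' hu hle'
      simp only [List.foldl_cons, if_neg hbr]
      refine ⟨hres.1, fun x => ?_⟩
      rw [hres.2, List.mem_cons]
      constructor
      · rintro (h | h)
        · exact Or.inl h
        · exact Or.inr (Or.inr h)
      · rintro (h | rfl | h)
        · exact Or.inl h
        · exact Or.inl hcin
        · exact Or.inr h

-- per-group agreement: A's union over people = B's sort + adjacent-dedup + count
theorem group_eq (cs : List Char) :
    PySem.Set.len ((PySem.Chars.splitOn cs ['\n']).foldl
        (fun s person => PySem.Set.update s person) PySem.Set.empty)
      = ((((PySem.List.sorted cs (fun c => c) false).foldl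
            (fun u c => if u = [] ∨ u.getLast? ≠ some c then u ++ [c] else u) []).filter
            (fun c => c != '\n')).map (fun _ => (1 : Int))).sum := by
  have h1 : (PySem.Chars.splitOn cs ['\n']).foldl
      (fun s person => PySem.Set.update s person) PySem.Set.empty
      = PySem.Set.ofList (PySem.Chars.splitOn cs ['\n']).flatten := by
    simp only [PySem.Set.update, PySem.Set.ofList, List.foldl_flatten]
  rw [h1, splitOn_flatten]
  set d := (PySem.List.sorted cs (fun c => c) false).foldl
      (fun u c => if u = [] ∨ u.getLast? ≠ some c then u ++ [c] else u) [] with hd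
  have hinv := adj_invariant (PySem.List.sorted cs (fun c => c) false) []
      (PySem.List.sorted_pairwise cs (fun c => c)) List.Pairwise.nil (by simp)
  have hd1 : d.Pairwise (· < ·) := hinv.1
  have hd2 : ∀ x, x ∈ d ↔ x ∈ cs := by
    intro x
    rw [hd, hinv.2, PySem.List.mem_sorted]
    simp
  have hndd : d.Nodup := hd1.imp (fun h => ne_of_lt h)
  have hnd : (d.filter (fun c => c != '\n')).Nodup := hndd.filter _
  have hsum : ((d.filter (fun c => c != '\n')).map (fun _ => (1 : Int))).sum
      = ((d.filter (fun c => c != '\n')).length : Int) := by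
    induction d.filter (fun c => c != '\n') with
    | nil => simp
    | cons a t iht => simp; omega
  rw [hsum]
  have hlen : (d.filter (fun c => c != '\n')).length
      = (PySem.Set.ofList (cs.filter (fun c => c != '\n'))).length := by
    rw [← List.toFinset_card_of_nodup hnd,
        ← List.toFinset_card_of_nodup (PySem.Set.nodup_ofList _)]
    congr 1
    ext x
    simp only [List.mem_toFinset, List.mem_filter, PySem.Set.mem_ofList, hd2]
  simp [PySem.Set.len, hlen]

theorem sol0_eq_alt : ∀ (pzin : List String), sol0 pzin = sol0_alt pzin := by
  intro pzin
  unfold sol0 sol0_alt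
  congr 1
  funext q g
  simp only [group_eq]

-- ===== VERDICT (by name: the statement is the Claim_ definition above) =====
theorem sol0_spec : Claim_equal_sol0 := fun pzin _ => sol0_eq_alt pzin
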